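-- pv_equiv track=rewrite | github.com/MentalBlood/quat | quat.py | coherent
-- ===== SOURCE A (Python) =====
-- def coherent(m):
-- 	N = len(m)
-- 	visited, visiting = [m[0]], [m[0]]
-- 	while len(visited) != N:
-- 		v = visiting
-- 		visiting = []
-- 		for c in v:
-- 			for ngc in m:
-- 				if ((abs(c[0]-ngc[0]) == 1 and c[1] == ngc[1]) or (abs(c[1]-ngc[1]) == 1 and c[0] == ngc[0])) and not (ngc in visited):
-- 					visiting.append(ngc)
-- 					visited.append(ngc)
-- 		if not visiting: return len(visited) == N
-- 	return True
-- ===== SOURCE B (Python) =====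
-- def coherent(m):
--     index = {}
--     for c in m:
--         index.setdefault((c[0], c[1]), []).append(tuple(c))
--     start = tuple(m[0])
--     seen = {start}
--     stack = [start]
--     while stack:
--         c = stack.pop()
--         x, y = c[0], c[1]
--         for k in ((x - 1, y), (x + 1, y), (x, y - 1), (x, y + 1)):
--             for nb in index.get(k, ()):
--                 if nb not in seen:
--                     seen.add(nb)
--                     stack.append(nb)
--     return len(seen) == len(m)
-- ===== Notes on version B (the rewrite author's own statement) =====
-- stated objective: faster
-- what changed: A grows the region in layers, scanning the whole cell list for every frontier cell and testing membership in a plain list (three nested passes); B builds a dict from (x,y) to its cells once, then runs a stack-based DFS with direct neighbour lookup in that dict and a hash set of seen cells.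
-- outside the precondition, e.g. on coherent([[5]]): A returns True, B raises IndexError
import Mathlib
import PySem

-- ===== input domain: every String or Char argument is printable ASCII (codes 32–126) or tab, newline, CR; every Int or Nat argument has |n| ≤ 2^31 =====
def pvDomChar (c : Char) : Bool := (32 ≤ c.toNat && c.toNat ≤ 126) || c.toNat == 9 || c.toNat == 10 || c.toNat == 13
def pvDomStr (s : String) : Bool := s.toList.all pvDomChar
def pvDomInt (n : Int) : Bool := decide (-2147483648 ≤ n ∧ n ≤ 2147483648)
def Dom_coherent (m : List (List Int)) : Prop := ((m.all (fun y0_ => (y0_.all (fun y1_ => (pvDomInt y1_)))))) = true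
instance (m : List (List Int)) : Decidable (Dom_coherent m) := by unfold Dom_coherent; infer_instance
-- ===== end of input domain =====

-- B replaces A's layered list-scanning flood fill by a DFS over a dict from (x,y) to its
-- cells with direct neighbour lookup and a set of seen cells.


-- ===== PORT A =====
-- abs(c[0]-ngc[0]) == 1 and c[1] == ngc[1]  or  abs(c[1]-ngc[1]) == 1 and c[0] == ngc[0]
def adjA (c ngc : List Int) : Bool :=
  ((PySem.List.pyGetD c 0 0 - PySem.List.pyGetD ngc 0 0).natAbs == 1
      && PySem.List.pyGetD c 1 0 == PySem.List.pyGetD ngc 1 0)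
  || ((PySem.List.pyGetD c 1 0 - PySem.List.pyGetD ngc 1 0).natAbs == 1
      && PySem.List.pyGetD c 0 0 == PySem.List.pyGetD ngc 0 0)

-- inner 'for ngc in m' of A, state = (visiting, visited)
def stepA (m : List (List Int)) (st : List (List Int) × List (List Int)) (c : List Int) :
    List (List Int) × List (List Int) :=
  m.foldl (fun st ngc =>
      if adjA c ngc && !(st.2.contains ngc) then (st.1 ++ [ngc], st.2 ++ [ngc]) else st) st

-- the 'while len(visited) != N' loop (fuel: visited grows on every non-returning pass)
def loopA (m : List (List Int)) : Nat → List (List Int) → List (List Int) → Bool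
  | 0, _, _ => true
  | f + 1, visiting, visited =>
    if visited.length == m.length then true
    else
      let p := visiting.foldl (stepA m) (([] : List (List Int)), visited)
      if p.1.isEmpty then p.2.length == m.length
      else loopA m f p.1 p.2

def coherent (m : List (List Int)) : Bool :=
  loopA m (m.length + 1) [PySem.List.pyGetD m 0 []] [PySem.List.pyGetD m 0 []]

-- ===== PORT B =====
-- (c[0], c[1])
def keyB (c : List Int) : Int × Int := (PySem.List.pyGetD c 0 0, PySem.List.pyGetD c 1 0)

-- index = {}; for c in m: index.setdefault((c[0], c[1]), []).append(tuple(c))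
def buildIndex (m : List (List Int)) : PySem.Dict (Int × Int) (List (List Int)) :=
  m.foldl (fun d c => d.modify (keyB c) [] (· ++ [c])) PySem.Dict.empty

-- for nb in index.get(k, ()): if nb not in seen: seen.add(nb); stack.append(nb)
def visitB (idx : PySem.Dict (Int × Int) (List (List Int)))
    (st : List (List Int) × PySem.Set (List Int)) (k : Int × Int) :
    List (List Int) × PySem.Set (List Int) :=
  (idx.getD k []).foldl (fun st nb =>
      if PySem.Set.contains st.2 nb then st else (st.1 ++ [nb], PySem.Set.add st.2 nb)) st

-- while stack: c = stack.pop(); …   (fuel: every pass pops one pushed-once cell)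
def loopB (idx : PySem.Dict (Int × Int) (List (List Int))) (N : Nat) :
    Nat → List (List Int) → PySem.Set (List Int) → Bool
  | 0, _, seen => seen.length == N
  | f + 1, stack, seen =>
    if stack.isEmpty then seen.length == N
    else
      let c := stack.getLastD []
      let rest := stack.dropLast
      let x := PySem.List.pyGetD c 0 0
      let y := PySem.List.pyGetD c 1 0
      let p := [(x - 1, y), (x + 1, y), (x, y - 1), (x, y + 1)].foldl (visitB idx) (rest, seen)
      loopB idx N f p.1 p.2

def coherent_alt (m : List (List Int)) : Bool :=
  let idx := buildIndex m
  let start := PySem.List.pyGetD m 0 []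
  loopB idx m.length (m.length + 1) [start] (PySem.Set.ofList [start])

-- ===== PRECONDITION & SPEC =====
-- Pre_ excludes exactly the inputs on which the Python A raises IndexError (empty m, or a
-- row of length < 2 reached by the neighbour scan) together with the degenerate single
-- short-row inputs ([[ ]], [[5]]) where A returns True without ever reading coordinates
-- while B's coordinate indexing raises.
def Pre_coherent (m : List (List Int)) : Prop := m ≠ [] ∧ ∀ r ∈ m, 2 ≤ r.length
instance (m : List (List Int)) : Decidable (Pre_coherent m) := by unfold Pre_coherent; infer_instance
def pvWitness_coherent : List (List Int) := [[0, 0], [0, 1], [1, 1]]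
def Spec_coherent (m : List (List Int)) (out : Bool) : Prop := out = coherent_alt m
instance (m : List (List Int)) (out : Bool) : Decidable (Spec_coherent m out) := by unfold Spec_coherent; infer_instance

-- ===== CLAIM (what is proved, stated in full; the proofs are below) =====
def Claim_equal_coherent : Prop := ∀ (m : List (List Int)), Dom_coherent m → Pre_coherent m → Spec_coherent m (coherent m)

-- ===== LEMMAS AND PROOFS =====

-- cells reachable from m[0] through side-adjacency, inside m
inductive Reach (m : List (List Int)) : List Int → Prop
  | start : Reach m (PySem.List.pyGetD m 0 [])
  | step {c g : List Int} : Reach m c → g ∈ m → adjA c g = true → Reach m g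

theorem reach_mem {m : List (List Int)} (hm : m ≠ []) {x : List Int}
    (h : Reach m x) : x ∈ m := by
  induction h with
  | start =>
    cases m with
    | nil => exact absurd rfl hm
    | cons a l => simp [PySem.List.pyGetD_zero]
  | step _ hg _ _ => exact hg

-- a "correct answer" set: nodup, membership = reachability
def GoodS (m : List (List Int)) (S : List (List Int)) : Prop :=
  S.Nodup ∧ ∀ x, x ∈ S ↔ Reach m x

theorem goodS_len {m : List (List Int)} {S S' : List (List Int)}
    (h : GoodS m S) (h' : GoodS m S') : S.length = S'.length := by
  have : S.Perm S' := (List.perm_ext_iff_of_nodup h.1 h'.1).2 (fun a => by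
    rw [h.2 a, h'.2 a])
  exact this.length_eq

theorem closed_goodS {m : List (List Int)} (seen : List (List Int))
    (hnd : seen.Nodup)
    (hre : ∀ x ∈ seen, Reach m x)
    (hst : PySem.List.pyGetD m 0 [] ∈ seen)
    (hcl : ∀ c ∈ seen, ∀ g ∈ m, adjA c g = true → g ∈ seen) :
    GoodS m seen := by
  refine ⟨hnd, fun x => ⟨fun hx => hre x hx, fun hx => ?_⟩⟩
  induction hx with
  | start => exact hst
  | step hc hg ha ih => exact hcl _ ih _ hg ha

theorem nodup_sub_len {m l : List (List Int)} (hn : l.Nodup) (hs : ∀ x ∈ l, x ∈ m) :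
    l.length ≤ (PySem.List.dedup m).length := by
  have hsub : l ⊆ PySem.List.dedup m := fun x hx => (PySem.List.mem_dedup _ _).2 (hs x hx)
  exact (List.subperm_of_subset hn hsub).length_le

theorem dedup_len_le (m : List (List Int)) : (PySem.List.dedup m).length ≤ m.length := by
  simpa using PySem.Set.length_ofList_le (xs := m)

-- arithmetic: adjacency ↔ the coordinates of g form one of the 4 neighbour keys of c
theorem adjA_iff (c g : List Int) :
    adjA c g = true ↔
      (PySem.List.pyGetD g 0 0, PySem.List.pyGetD g 1 0) ∈
        [(PySem.List.pyGetD c 0 0 - 1, PySem.List.pyGetD c 1 0),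
         (PySem.List.pyGetD c 0 0 + 1, PySem.List.pyGetD c 1 0),
         (PySem.List.pyGetD c 0 0, PySem.List.pyGetD c 1 0 - 1),
         (PySem.List.pyGetD c 0 0, PySem.List.pyGetD c 1 0 + 1)] := by
  simp only [adjA, List.mem_cons, List.not_mem_nil, or_false, Prod.mk.injEq,
    Bool.or_eq_true, Bool.and_eq_true, beq_iff_eq]
  omega

-- membership in a bucket of the index
theorem mem_bucket (m : List (List Int)) (g : List Int) (k : Int × Int) :
    g ∈ (buildIndex m).getD k [] ↔ g ∈ m ∧ keyB g = k := by
  have h1 : buildIndex m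
      = (m.map (fun c => (keyB c, c))).foldl (fun d p => d.modify p.1 [] (· ++ [p.2])) PySem.Dict.empty := by
    simp [buildIndex, List.foldl_map]
  rw [h1, PySem.Dict.getD_foldl_modify_append]
  simp only [PySem.Dict.getD_empty, List.nil_append, List.mem_map, List.mem_filter,
    List.mem_map]
  constructor
  · rintro ⟨p, ⟨⟨c, hc, rfl⟩, hk⟩, rfl⟩
    exact ⟨hc, by simpa using hk⟩
  · rintro ⟨hg, hk⟩
    exact ⟨(keyB g, g), ⟨⟨g, hg, rfl⟩, by simpa using hk⟩, rfl⟩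

-- ---------- fold facts for B ----------

theorem visitB_aux (l : List (List Int)) :
    ∀ (st1 : List (List Int)) (sn : PySem.Set (List Int)),
    ∃ fr, (l.foldl (fun st nb =>
        if PySem.Set.contains st.2 nb then st else (st.1 ++ [nb], PySem.Set.add st.2 nb)) (st1, sn))
        = (st1 ++ fr, sn ++ fr)
      ∧ (∀ x ∈ fr, x ∈ l ∧ x ∉ sn)
      ∧ (∀ x ∈ l, x ∈ sn ++ fr)
      ∧ (sn.Nodup → (sn ++ fr).Nodup) := by
  induction l with
  | nil =>
    intro st1 sn
    exact ⟨[], by simp, by simp, by simp, by simp⟩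
  | cons nb l ih =>
    intro st1 sn
    simp only [List.foldl_cons]
    by_cases hc : PySem.Set.contains sn nb = true
    · have hmem : nb ∈ sn := by simpa using hc
      rw [if_pos hc]
      obtain ⟨fr, h1, h2, h3, h4⟩ := ih st1 sn
      refine ⟨fr, h1, ?_, ?_, h4⟩
      · exact fun x hx => ⟨List.mem_cons_of_mem _ (h2 x hx).1, (h2 x hx).2⟩
      · intro x hx
        rcases List.mem_cons.mp hx with rfl | hx
        · exact List.mem_append_left _ hmem
        · exact h3 x hx
    · have hnmem : nb ∉ sn := by simpa using hc
      rw [if_neg hc, PySem.Set.add_of_not_mem hnmem]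
      obtain ⟨fr, h1, h2, h3, h4⟩ := ih (st1 ++ [nb]) (sn ++ [nb])
      have hsnb : (sn ++ [nb]).Nodup → True := fun _ => trivial
      refine ⟨nb :: fr, ?_, ?_, ?_, ?_⟩
      · rw [h1]; simp
      · intro x hx
        rcases List.mem_cons.mp hx with rfl | hx
        · exact ⟨List.mem_cons_self, hnmem⟩
        · refine ⟨List.mem_cons_of_mem _ (h2 x hx).1, fun hxs => (h2 x hx).2 (List.mem_append_left _ hxs)⟩
      · intro x hx
        rcases List.mem_cons.mp hx with rfl | hx
        · simp
        · have := h3 x hx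
          simp only [List.mem_append, List.mem_cons] at this ⊢
          tauto
      · intro hn
        have hnb : (sn ++ [nb]).Nodup := by
          rw [List.nodup_append]
          refine ⟨hn, List.nodup_singleton _, ?_⟩
          intro a ha b hbb
          simp only [List.mem_singleton] at hbb
          subst hbb
          exact fun h => hnmem (h ▸ ha)
        have := h4 hnb
        simpa [List.append_assoc] using this

theorem visitB_spec (idx : PySem.Dict (Int × Int) (List (List Int))) (k : Int × Int)
    (st1 : List (List Int)) (sn : PySem.Set (List Int)) :
    ∃ fr, visitB idx (st1, sn) k = (st1 ++ fr, sn ++ fr)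
      ∧ (∀ x ∈ fr, x ∈ idx.getD k [] ∧ x ∉ sn)
      ∧ (∀ x ∈ idx.getD k [], x ∈ sn ++ fr)
      ∧ (sn.Nodup → (sn ++ fr).Nodup) := by
  unfold visitB
  exact visitB_aux (idx.getD k []) st1 sn

theorem visitB_fold (idx : PySem.Dict (Int × Int) (List (List Int))) (ks : List (Int × Int)) :
    ∀ (st1 : List (List Int)) (sn : PySem.Set (List Int)),
    ∃ fr, ks.foldl (visitB idx) (st1, sn) = (st1 ++ fr, sn ++ fr)
      ∧ (∀ x ∈ fr, (∃ k ∈ ks, x ∈ idx.getD k []) ∧ x ∉ sn)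
      ∧ (∀ k ∈ ks, ∀ x ∈ idx.getD k [], x ∈ sn ++ fr)
      ∧ (sn.Nodup → (sn ++ fr).Nodup) := by
  induction ks with
  | nil =>
    intro st1 sn
    exact ⟨[], by simp, by simp, by simp, by simp⟩
  | cons k ks ih =>
    intro st1 sn
    rw [List.foldl_cons]
    obtain ⟨fr1, h1, h2, h3, h4⟩ := visitB_spec idx k st1 sn
    rw [h1]
    obtain ⟨fr2, g1, g2, g3, g4⟩ := ih (st1 ++ fr1) (sn ++ fr1)
    have hmono : ∀ x, x ∈ sn ++ fr1 → x ∈ sn ++ (fr1 ++ fr2) := by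
      intro x hx
      simp only [List.mem_append] at hx ⊢
      tauto
    refine ⟨fr1 ++ fr2, ?_, ?_, ?_, ?_⟩
    · rw [g1]; simp [List.append_assoc]
    · intro x hx
      rcases List.mem_append.mp hx with hx | hx
      · exact ⟨⟨k, List.mem_cons_self, (h2 x hx).1⟩, (h2 x hx).2⟩
      · obtain ⟨⟨k', hk', hxk⟩, hxs⟩ := g2 x hx
        refine ⟨⟨k', List.mem_cons_of_mem _ hk', hxk⟩, fun hxn => hxs (List.mem_append_left _ hxn)⟩
    · intro k' hk' x hx
      rcases List.mem_cons.mp hk' with rfl | hk'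
      · exact hmono x (h3 x hx)
      · have := g3 k' hk' x hx
        simp only [List.mem_append] at this ⊢
        tauto
    · intro hn
      have := g4 (h4 hn)
      simpa [List.append_assoc] using this

-- ---------- fold facts for A ----------

theorem innerA_aux (c : List Int) (m' : List (List Int)) :
    ∀ (vis vd : List (List Int)),
    ∃ fr, (m'.foldl (fun st ngc =>
        if adjA c ngc && !(st.2.contains ngc) then (st.1 ++ [ngc], st.2 ++ [ngc]) else st) (vis, vd))
        = (vis ++ fr, vd ++ fr)
      ∧ (∀ g ∈ fr, g ∈ m' ∧ adjA c g = true ∧ g ∉ vd)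
      ∧ (∀ g ∈ m', adjA c g = true → g ∈ vd ++ fr)
      ∧ (vd.Nodup → (vd ++ fr).Nodup) := by
  induction m' with
  | nil =>
    intro vis vd
    exact ⟨[], by simp, by simp, by simp, by simp⟩
  | cons g m' ih =>
    intro vis vd
    simp only [List.foldl_cons]
    by_cases hb : (adjA c g && !(vd.contains g)) = true
    · obtain ⟨hadj, hnmem⟩ : adjA c g = true ∧ g ∉ vd := by simpa using hb
      rw [if_pos hb]
      obtain ⟨fr, h1, h2, h3, h4⟩ := ih (vis ++ [g]) (vd ++ [g])
      refine ⟨g :: fr, ?_, ?_, ?_, ?_⟩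
      · rw [h1]; simp
      · intro x hx
        rcases List.mem_cons.mp hx with rfl | hx
        · exact ⟨List.mem_cons_self, hadj, hnmem⟩
        · obtain ⟨hxm, hxa, hxv⟩ := h2 x hx
          exact ⟨List.mem_cons_of_mem _ hxm, hxa,
            fun hxs => hxv (List.mem_append_left _ hxs)⟩
      · intro x hx hxa
        rcases List.mem_cons.mp hx with rfl | hx
        · simp
        · have := h3 x hx hxa
          simp only [List.mem_append, List.mem_cons] at this ⊢
          tauto
      · intro hn
        have hnb : (vd ++ [g]).Nodup := by
          rw [List.nodup_append]
          refine ⟨hn, List.nodup_singleton _, ?_⟩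
          intro a ha b hbb
          simp only [List.mem_singleton] at hbb
          subst hbb
          exact fun h => hnmem (h ▸ ha)
        have := h4 hnb
        simpa [List.append_assoc] using this
    · rw [if_neg hb]
      have hor : adjA c g = false ∨ g ∈ vd := by
        by_cases ha : adjA c g = true
        · right
          by_contra hgv
          exact hb (by simp [ha, hgv])
        · left
          simpa using ha
      obtain ⟨fr, h1, h2, h3, h4⟩ := ih vis vd
      refine ⟨fr, h1, ?_, ?_, h4⟩
      · exact fun x hx => ⟨List.mem_cons_of_mem _ (h2 x hx).1, (h2 x hx).2.1, (h2 x hx).2.2⟩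
      · intro x hx hxa
        rcases List.mem_cons.mp hx with rfl | hx
        · rcases hor with h | h
          · rw [h] at hxa; cases hxa
          · exact List.mem_append_left _ h
        · exact h3 x hx hxa

theorem stepA_spec (m : List (List Int)) (c : List Int) (vis vd : List (List Int)) :
    ∃ fr, stepA m (vis, vd) c = (vis ++ fr, vd ++ fr)
      ∧ (∀ g ∈ fr, g ∈ m ∧ adjA c g = true ∧ g ∉ vd)
      ∧ (∀ g ∈ m, adjA c g = true → g ∈ vd ++ fr)
      ∧ (vd.Nodup → (vd ++ fr).Nodup) := by
  unfold stepA
  exact innerA_aux c m vis vd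

theorem outerA_fold (m : List (List Int)) (v : List (List Int)) :
    ∀ (vis vd : List (List Int)),
    ∃ fr, v.foldl (stepA m) (vis, vd) = (vis ++ fr, vd ++ fr)
      ∧ (∀ g ∈ fr, g ∈ m ∧ ∃ c ∈ v, adjA c g = true)
      ∧ (∀ c ∈ v, ∀ g ∈ m, adjA c g = true → g ∈ vd ++ fr)
      ∧ (vd.Nodup → (vd ++ fr).Nodup) := by
  induction v with
  | nil =>
    intro vis vd
    exact ⟨[], by simp, by simp, by simp, by simp⟩
  | cons c v ih =>
    intro vis vd
    rw [List.foldl_cons]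
    obtain ⟨fr1, h1, h2, h3, h4⟩ := stepA_spec m c vis vd
    rw [h1]
    obtain ⟨fr2, g1, g2, g3, g4⟩ := ih (vis ++ fr1) (vd ++ fr1)
    have hmono : ∀ x, x ∈ vd ++ fr1 → x ∈ vd ++ (fr1 ++ fr2) := by
      intro x hx
      simp only [List.mem_append] at hx ⊢
      tauto
    refine ⟨fr1 ++ fr2, ?_, ?_, ?_, ?_⟩
    · rw [g1]; simp [List.append_assoc]
    · intro x hx
      rcases List.mem_append.mp hx with hx | hx
      · exact ⟨(h2 x hx).1, c, List.mem_cons_self, (h2 x hx).2.1⟩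
      · obtain ⟨hxm, c', hc', hxa⟩ := g2 x hx
        exact ⟨hxm, c', List.mem_cons_of_mem _ hc', hxa⟩
    · intro c' hc' g hg hga
      rcases List.mem_cons.mp hc' with rfl | hc'
      · exact hmono g (h3 g hg hga)
      · have := g3 c' hc' g hg hga
        simp only [List.mem_append] at this ⊢
        tauto
    · intro hn
      have := g4 (h4 hn)
      simpa [List.append_assoc] using this

-- ---------- the B loop computes a GoodS set ----------

theorem loopB_eq (m : List (List Int)) (hm : m ≠ []) :
    ∀ (f : Nat) (stack : List (List Int)) (seen : PySem.Set (List Int)),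
    seen.Nodup →
    (∀ x ∈ stack, x ∈ seen) →
    (∀ x ∈ seen, Reach m x) →
    PySem.List.pyGetD m 0 [] ∈ seen →
    (∀ c ∈ seen, c ∈ stack ∨ ∀ g ∈ m, adjA c g = true → g ∈ seen) →
    stack.length + ((PySem.List.dedup m).length - seen.length) ≤ f →
    ∃ S, GoodS m S ∧
      loopB (buildIndex m) m.length f stack seen = (S.length == m.length) := by
  intro f
  induction f with
  | zero =>
    intro stack seen hnd hsub hre hst hexp hfuel
    have hstack : stack = [] := by
      cases stack with
      | nil => rfl
      | cons a l => simp at hfuel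
    subst hstack
    refine ⟨seen, closed_goodS seen hnd hre hst ?_, rfl⟩
    intro c hc
    rcases hexp c hc with h | h
    · cases h
    · exact h
  | succ f ih =>
    intro stack seen hnd hsub hre hst hexp hfuel
    rcases List.eq_nil_or_concat stack with rfl | ⟨rest, c, rfl⟩
    · refine ⟨seen, closed_goodS seen hnd hre hst ?_, by simp [loopB]⟩
      intro c hc
      rcases hexp c hc with h | h
      · cases h
      · exact h
    · have hcm : c ∈ seen := hsub c (by simp)
      have hcr : Reach m c := hre c hcm
      simp only [List.concat_eq_append] at hsub hexp hfuel ⊢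
      have hse : (rest ++ [c]).isEmpty = false := by simp
      simp only [loopB, hse, Bool.false_eq_true, if_false,
        List.getLastD_concat, List.dropLast_concat]
      obtain ⟨fr, h1, h2, h3, h4⟩ := visitB_fold (buildIndex m)
        [(PySem.List.pyGetD c 0 0 - 1, PySem.List.pyGetD c 1 0),
         (PySem.List.pyGetD c 0 0 + 1, PySem.List.pyGetD c 1 0),
         (PySem.List.pyGetD c 0 0, PySem.List.pyGetD c 1 0 - 1),
         (PySem.List.pyGetD c 0 0, PySem.List.pyGetD c 1 0 + 1)] rest seen
      rw [h1]
      have hfr_nb : ∀ x ∈ fr, x ∈ m ∧ adjA c x = true := by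
        intro x hx
        obtain ⟨⟨k, hk, hxk⟩, _⟩ := h2 x hx
        obtain ⟨hxm, hxkey⟩ := (mem_bucket m x k).1 hxk
        refine ⟨hxm, ?_⟩
        rw [adjA_iff]
        have : (PySem.List.pyGetD x 0 0, PySem.List.pyGetD x 1 0) = k := hxkey
        rw [this]
        exact hk
      have hdown : ∀ g ∈ m, adjA c g = true → g ∈ seen ++ fr := by
        intro g hg hga
        have hk := (adjA_iff c g).1 hga
        have hbk : g ∈ (buildIndex m).getD (keyB g) [] := (mem_bucket m g (keyB g)).2 ⟨hg, rfl⟩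
        exact h3 (keyB g) hk g hbk
      have hnd' : (seen ++ fr).Nodup := h4 hnd
      have hre' : ∀ x ∈ seen ++ fr, Reach m x := by
        intro x hx
        rcases List.mem_append.mp hx with hx | hx
        · exact hre x hx
        · exact Reach.step hcr (hfr_nb x hx).1 (hfr_nb x hx).2
      have hsublen : (seen ++ fr).length ≤ (PySem.List.dedup m).length :=
        nodup_sub_len hnd' (fun x hx => reach_mem hm (hre' x hx))
      refine ih (rest ++ fr) (seen ++ fr) hnd' ?_ hre' (List.mem_append_left _ hst) ?_ ?_
      · intro x hx
        rcases List.mem_append.mp hx with hx | hx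
        · exact List.mem_append_left _ (hsub x (List.mem_append_left _ hx))
        · exact List.mem_append_right _ hx
      · intro d hd
        rcases List.mem_append.mp hd with hd | hd
        · rcases hexp d hd with hd2 | hd2
          · rcases List.mem_append.mp hd2 with h | h
            · exact .inl (List.mem_append_left _ h)
            · have : d = c := List.mem_singleton.mp h
              subst this
              exact .inr hdown
          · exact .inr fun g hg hga => List.mem_append_left _ (hd2 g hg hga)
        · exact .inl (List.mem_append_right _ hd)
      · have h5 : seen.length + fr.length ≤ (PySem.List.dedup m).length := by
          simpa using hsublen
        simp only [List.length_append, List.length_cons] at hfuel ⊢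
        omega

-- ---------- the A loop gives the same answer ----------

theorem loopA_eq (m : List (List Int)) (hm : m ≠ []) (S : List (List Int)) (hS : GoodS m S) :
    ∀ (f : Nat) (visiting visited : List (List Int)),
    visited.Nodup →
    (∀ x ∈ visiting, x ∈ visited) →
    (∀ x ∈ visited, Reach m x) →
    PySem.List.pyGetD m 0 [] ∈ visited →
    (∀ c ∈ visited, c ∈ visiting ∨ ∀ g ∈ m, adjA c g = true → g ∈ visited) →
    1 + ((PySem.List.dedup m).length - visited.length) ≤ f →
    loopA m f visiting visited = (S.length == m.length) := by
  intro f
  induction f with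
  | zero => intro _ _ _ _ _ _ _ hf; omega
  | succ f ih =>
    intro visiting visited hnd hsub hre hst hexp hfuel
    have hSle : S.length ≤ (PySem.List.dedup m).length :=
      nodup_sub_len hS.1 (fun x hx => reach_mem hm ((hS.2 x).1 hx))
    have hvS : visited.length ≤ S.length :=
      (List.subperm_of_subset hnd (fun x hx => (hS.2 x).2 (hre x hx))).length_le
    by_cases hlen : visited.length = m.length
    · have hSN : S.length = m.length := by
        have := dedup_len_le m
        omega
      simp [loopA, hlen, hSN]
    · have hbe : (visited.length == m.length) = false := by
        simpa using hlen
      simp only [loopA, hbe, Bool.false_eq_true, if_false]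
      obtain ⟨fr, h1, h2, h3, h4⟩ := outerA_fold m visiting [] visited
      rw [h1]
      by_cases hfr : fr = []
      · subst hfr
        have hgood : GoodS m visited := by
          refine closed_goodS visited hnd hre hst ?_
          intro d hd
          rcases hexp d hd with h | h
          · intro g hg hga
            have := h3 d h g hg hga
            simpa using this
          · exact h
        have hlen2 : visited.length = S.length := goodS_len hgood hS
        simp [hlen2]
      · have hfre : fr.isEmpty = false := by
          cases fr with
          | nil => exact absurd rfl hfr
          | cons a l => rfl
        simp only [List.nil_append, hfre, Bool.false_eq_true, if_false]
        have hnd' : (visited ++ fr).Nodup := h4 hnd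
        have hre' : ∀ x ∈ visited ++ fr, Reach m x := by
          intro x hx
          rcases List.mem_append.mp hx with hx | hx
          · exact hre x hx
          · obtain ⟨hxm, c, hc, hxa⟩ := h2 x hx
            exact Reach.step (hre c (hsub c hc)) hxm hxa
        have hlen' : (visited ++ fr).length ≤ (PySem.List.dedup m).length :=
          nodup_sub_len hnd' (fun x hx => reach_mem hm (hre' x hx))
        refine ih fr (visited ++ fr) hnd' (fun x hx => List.mem_append_right _ hx) hre'
          (List.mem_append_left _ hst) ?_ ?_
        · intro d hd
          rcases List.mem_append.mp hd with hd | hd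
          · rcases hexp d hd with h | h
            · exact .inr fun g hg hga => h3 d h g hg hga
            · exact .inr fun g hg hga => List.mem_append_left _ (h g hg hga)
          · exact .inl hd
        · have hfrpos : 1 ≤ fr.length := by
            cases fr with
            | nil => exact absurd rfl hfr
            | cons a l => simp
          simp only [List.length_append] at hlen' ⊢
          omega

-- ---------- wrap up ----------

theorem coherent_alt_char (m : List (List Int)) (hm : m ≠ []) :
    ∃ S, GoodS m S ∧ coherent_alt m = (S.length == m.length) := by
  have hstart : PySem.Set.ofList [PySem.List.pyGetD m 0 []] = [PySem.List.pyGetD m 0 []] :=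
    PySem.Set.ofList_eq_self_of_nodup _ (List.nodup_singleton _)
  have halt : coherent_alt m = loopB (buildIndex m) m.length (m.length + 1)
      [PySem.List.pyGetD m 0 []] (PySem.Set.ofList [PySem.List.pyGetD m 0 []]) := rfl
  rw [halt, hstart]
  refine loopB_eq m hm (m.length + 1) [PySem.List.pyGetD m 0 []] [PySem.List.pyGetD m 0 []]
    (List.nodup_singleton _) (fun x hx => hx) ?_ (List.mem_singleton.mpr rfl) ?_ ?_
  · intro x hx
    rw [List.mem_singleton.mp hx]
    exact Reach.start
  · intro c hc
    exact .inl hc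
  · have := dedup_len_le m
    simp only [List.length_singleton]
    omega

theorem coherent_spec_aux (m : List (List Int)) (hm : m ≠ []) :
    coherent m = coherent_alt m := by
  obtain ⟨S, hS, hB⟩ := coherent_alt_char m hm
  rw [hB]
  show loopA m (m.length + 1) [PySem.List.pyGetD m 0 []] [PySem.List.pyGetD m 0 []]
      = (S.length == m.length)
  refine loopA_eq m hm S hS (m.length + 1) _ _ (List.nodup_singleton _) (fun x hx => hx) ?_
    (List.mem_singleton.mpr rfl) ?_ ?_
  · intro x hx
    rw [List.mem_singleton.mp hx]
    exact Reach.start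
  · intro c hc
    exact .inl hc
  · have := dedup_len_le m
    simp only [List.length_singleton]
    omega

-- ===== VERDICT (by name: the statement is the Claim_ definition above) =====
theorem coherent_spec : Claim_equal_coherent := by
  intro m _ hpre
  unfold Spec_coherent
  exact coherent_spec_aux m hpre.1
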